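-- pv_equiv track=rewrite | github.com/Geosearchef/PH-Lab | analysis.py | string_bigram_substitue
-- ===== SOURCE A (Python) =====
-- def string_bigram_substitue(string: str) -> tuple[str, str]:
--     if not " " in string and len(string) % 2 != 0:
--         return None
--
--     pairs = string.split(" ") if " " in string else [string[i:i+2] for i in range(0, len(string), 2)]
--
--     result = ""
--     substitutes_by_pair = {}
--     next_char = 97
--     for p in pairs:
--         if p not in substitutes_by_pair:
--             substitutes_by_pair[p] = chr(next_char)
--             next_char += 1
--         result += substitutes_by_pair[p]
--
--     return result, "bigram group"
-- ===== SOURCE B (Python) =====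
-- def string_bigram_substitue(string: str) -> tuple[str, str]:
--     if not " " in string and len(string) % 2 != 0:
--         return None
--
--     pairs = string.split(" ") if " " in string else [string[i:i+2] for i in range(0, len(string), 2)]
--
--     # no substitution table at all: the letter of token p is 'a' advanced by the
--     # number of distinct tokens occurring strictly before p's first occurrence
--     result = "".join(chr(97 + len(set(pairs[:pairs.index(p)]))) for p in pairs)
--     return result, "bigram group"
-- ===== Notes on version B (the rewrite author's own statement) =====
-- stated objective: alternative
-- what changed: A builds a mutable substitution dict plus a next_char counter in one stateful emit loop; B keeps no table or counter at all and computes each token's letter directly as 97 plus the number of distinct tokens strictly before that token's first occurrence (pairs.index + len(set(prefix))).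
import Mathlib
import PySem

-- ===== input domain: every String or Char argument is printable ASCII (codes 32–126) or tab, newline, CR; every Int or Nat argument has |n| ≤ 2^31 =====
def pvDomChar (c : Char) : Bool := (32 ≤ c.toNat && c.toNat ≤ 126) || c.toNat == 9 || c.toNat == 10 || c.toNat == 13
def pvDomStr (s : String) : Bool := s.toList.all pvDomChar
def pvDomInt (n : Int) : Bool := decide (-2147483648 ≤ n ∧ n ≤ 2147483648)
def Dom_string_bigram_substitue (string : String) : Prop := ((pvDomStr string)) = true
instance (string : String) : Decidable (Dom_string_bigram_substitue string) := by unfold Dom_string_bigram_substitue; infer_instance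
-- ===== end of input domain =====

-- B drops A's substitution table and counter entirely: the letter of a token is 97 plus the number
-- of distinct tokens strictly before its first occurrence (alternative decomposition; no claim about speed).

-- shared helper: the pair list, computed identically (word for word) in both Python sources
def bgPairs (string : String) : List String :=
  if PySem.Str.isIn " " string then
    (PySem.Str.split? string " ").getD []   -- sep " " ≠ "", so split? is always `some`
  else
    (PySem.List.pyRange 0 (PySem.Str.len string) 2).map
      (fun i => PySem.Str.slice string (some i) (some (i + 2)))

-- ===== PORT A =====
-- A's loop body: if p unseen, bind it to chr(next_char) and bump the counter; emit the stored char
def bgStep (st : List Char × PySem.Dict String Char × Int) (p : String) :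
    List Char × PySem.Dict String Char × Int :=
  let dn := if st.2.1.contains p then (st.2.1, st.2.2)
            else (st.2.1.insert p (Char.ofNat st.2.2.toNat), st.2.2 + 1)
  (st.1 ++ [dn.1.getD p ' '], dn.1, dn.2)   -- lookup cannot miss: the key was just ensured present

def string_bigram_substitue (string : String) : Option (String × String) :=
  if PySem.Str.isIn " " string = false ∧ PySem.Int.mod (PySem.Str.len string) 2 ≠ 0 then none
  else
    let st := (bgPairs string).foldl bgStep ([], PySem.Dict.empty, 97)
    some (String.mk st.1, "bigram group")

-- ===== PORT B =====
def string_bigram_substitue_alt (string : String) : Option (String × String) :=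
  if PySem.Str.isIn " " string = false ∧ PySem.Int.mod (PySem.Str.len string) 2 ≠ 0 then none
  else
    let pairs := bgPairs string
    -- chr(97 + len(set(pairs[:pairs.index(p)]))); pairs.index(p) cannot raise (p ∈ pairs), getD 0 is its total form
    some (String.mk (pairs.map (fun p =>
      Char.ofNat (97 + PySem.Set.len (PySem.Set.ofList
        (PySem.List.slice pairs none (some (((PySem.List.index? pairs p).getD 0 : Nat) : Int))))).toNat)),
      "bigram group")

-- ===== PRECONDITION & SPEC =====
def Spec_string_bigram_substitue (string : String) (out : Option (String × String)) : Prop := out = string_bigram_substitue_alt string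
instance (string : String) (out : Option (String × String)) : Decidable (Spec_string_bigram_substitue string out) := by unfold Spec_string_bigram_substitue; infer_instance

-- ===== CLAIM (what is proved, stated in full; the proofs are below) =====
def Claim_equal_string_bigram_substitue : Prop := ∀ (string : String), Dom_string_bigram_substitue string → Spec_string_bigram_substitue string (string_bigram_substitue string)

-- ===== LEMMAS AND PROOFS =====

-- the character both programs assign to pair p of the list xs
def bgChar (xs : List String) (p : String) : Char :=
  Char.ofNat (97 + List.idxOf p (PySem.List.dedup xs))

lemma set_update_append (ys : List String) : ∀ (s : PySem.Set String),
    ∃ t, PySem.Set.update s ys = s ++ t := by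
  induction ys with
  | nil => intro s; exact ⟨[], by simp [PySem.Set.update]⟩
  | cons y ys ih =>
    intro s
    show ∃ t, PySem.Set.update (PySem.Set.add s y) ys = s ++ t
    unfold PySem.Set.add
    split
    · exact ih s
    · obtain ⟨t, ht⟩ := ih (s ++ [y])
      exact ⟨[y] ++ t, by simpa using ht⟩

lemma dedup_append (xs ys : List String) :
    ∃ t, PySem.List.dedup (xs ++ ys) = PySem.List.dedup xs ++ t := by
  unfold PySem.List.dedup
  rw [PySem.Set.ofList_append]
  exact set_update_append ys (PySem.Set.ofList xs)

lemma bgChar_stable (xs ys : List String) (p : String) (h : p ∈ xs) :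
    bgChar (xs ++ ys) p = bgChar xs p := by
  obtain ⟨t, ht⟩ := dedup_append xs ys
  unfold bgChar
  rw [ht, List.idxOf_append, if_pos ((PySem.List.mem_dedup xs p).2 h)]

lemma dedup_snoc_new (xs : List String) (p : String) (h : p ∉ xs) :
    PySem.List.dedup (xs ++ [p]) = PySem.List.dedup xs ++ [p] := by
  unfold PySem.List.dedup
  rw [PySem.Set.ofList_append]
  show PySem.Set.add (PySem.Set.ofList xs) p = _
  unfold PySem.Set.add
  rw [if_neg]
  simp only [PySem.Set.contains, List.contains_eq_mem, decide_eq_true_eq]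
  exact fun hm => h ((PySem.Set.mem_ofList xs p).1 hm)

lemma bgChar_snoc_new (xs : List String) (p : String) (h : p ∉ xs) :
    bgChar (xs ++ [p]) p = Char.ofNat (97 + (PySem.List.dedup xs).length) := by
  unfold bgChar
  rw [dedup_snoc_new xs p h, List.idxOf_append,
      if_neg (fun hm => h ((PySem.List.mem_dedup xs p).1 hm))]
  simp

-- invariant run of A's loop
lemma A_loop (ps : List String) : ∀ (seen : List String) (res : List Char)
    (d : PySem.Dict String Char),
    (∀ q, d.contains q = true ↔ q ∈ seen) →
    (∀ q, q ∈ seen → d.getD q ' ' = bgChar seen q) →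
    (ps.foldl bgStep (res, d, 97 + ((PySem.List.dedup seen).length : Int))).1
      = res ++ ps.map (bgChar (seen ++ ps)) := by
  induction ps with
  | nil => intro seen res d _ _; simp
  | cons p ps ih =>
    intro seen res d hc hg
    by_cases hp : p ∈ seen
    · have hstep : bgStep (res, d, 97 + ((PySem.List.dedup seen).length : Int)) p
          = (res ++ [bgChar seen p], d, 97 + ((PySem.List.dedup seen).length : Int)) := by
        unfold bgStep
        rw [if_pos ((hc p).2 hp)]
        simp [hg p hp]
      have hded : PySem.List.dedup (seen ++ [p]) = PySem.List.dedup seen := by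
        unfold PySem.List.dedup
        rw [PySem.Set.ofList_append]
        show PySem.Set.add (PySem.Set.ofList seen) p = PySem.Set.ofList seen
        unfold PySem.Set.add
        rw [if_pos]
        simp only [PySem.Set.contains, List.contains_eq_mem, decide_eq_true_eq]
        exact (PySem.Set.mem_ofList seen p).2 hp
      have := ih (seen ++ [p]) (res ++ [bgChar seen p]) d
        (fun q => by rw [hc q]; simp; intro hq; rw [hq]; exact hp)
        (fun q hq => by
          rcases List.mem_append.1 hq with h1 | h1
          · rw [hg q h1, bgChar_stable seen [p] q h1]
          · have h2 : q = p := by simpa using h1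
            rw [h2, hg p hp, bgChar_stable seen [p] p hp])
      rw [List.foldl_cons, hstep]
      rw [hded] at this
      rw [this]
      have hfirst : bgChar seen p = bgChar (seen ++ p :: ps) p := by
        rw [bgChar_stable seen (p :: ps) p hp]
      rw [List.map_cons, hfirst]
      simp [List.append_assoc]
    · -- new pair
      set c : Char := Char.ofNat (97 + ((PySem.List.dedup seen).length : Int)).toNat with hcdef
      have htoNat : (97 + ((PySem.List.dedup seen).length : Int)).toNat
          = 97 + (PySem.List.dedup seen).length := by omega
      have hstep : bgStep (res, d, 97 + ((PySem.List.dedup seen).length : Int)) p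
          = (res ++ [c], d.insert p c, 97 + ((PySem.List.dedup seen).length : Int) + 1) := by
        unfold bgStep
        rw [if_neg (fun h => hp ((hc p).1 h))]
        simp only [PySem.Dict.getD, PySem.Dict.get?_insert_self, Option.getD_some]
        rfl
      have hded : PySem.List.dedup (seen ++ [p]) = PySem.List.dedup seen ++ [p] :=
        dedup_snoc_new seen p hp
      have hnext : 97 + ((PySem.List.dedup seen).length : Int) + 1
          = 97 + ((PySem.List.dedup (seen ++ [p])).length : Int) := by
        rw [hded]; simp; omega
      have := ih (seen ++ [p]) (res ++ [c]) (d.insert p c)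
        (fun q => by
          rw [PySem.Dict.contains_insert, Bool.or_eq_true, beq_iff_eq, hc q]
          simp [or_comm])
        (fun q hq => by
          rcases List.mem_append.1 hq with h1 | h1
          · have hne : q ≠ p := fun h => hp (h ▸ h1)
            have he : (d.insert p c).getD q ' ' = d.getD q ' ' := by
              simp only [PySem.Dict.getD, PySem.Dict.get?_insert_of_ne d c hne]
            rw [he, hg q h1, bgChar_stable seen [p] q h1]
          · have h2 : q = p := by simpa using h1
            have he : (d.insert p c).getD p ' ' = c := by
              simp only [PySem.Dict.getD, PySem.Dict.get?_insert_self, Option.getD_some]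
            rw [h2, he, bgChar_snoc_new seen p hp]
            congr 1)
      rw [List.foldl_cons, hstep, hnext, this]
      have hfirst : c = bgChar (seen ++ p :: ps) p := by
        have : seen ++ p :: ps = (seen ++ [p]) ++ ps := by simp
        rw [this, bgChar_stable (seen ++ [p]) ps p (by simp), bgChar_snoc_new seen p hp,
          hcdef, htoNat]
      rw [List.map_cons, ← hfirst]
      simp [List.append_assoc]

-- B's per-token expression equals bgChar: the distinct tokens before p's first occurrence
-- are exactly the dedup entries preceding p
lemma B_lookup (pairs : List String) (p : String) (hp : p ∈ pairs) :
    Char.ofNat (97 + PySem.Set.len (PySem.Set.ofList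
        (PySem.List.slice pairs none (some (((PySem.List.index? pairs p).getD 0 : Nat) : Int))))).toNat
      = bgChar pairs p := by
  cases hidx : PySem.List.index? pairs p with
  | none => exact absurd hp ((PySem.List.index?_eq_none_iff _ _).1 hidx)
  | some k =>
    obtain ⟨pre, suf, hps, hlen, hnp⟩ := (PySem.List.index?_eq_some_iff _ _ _).1 hidx
    subst hps; subst hlen
    rw [Option.getD_some, PySem.List.slice_to_natCast, List.take_left]
    obtain ⟨t, ht⟩ := dedup_append (pre ++ [p]) suf
    rw [dedup_snoc_new pre p hnp] at ht
    unfold bgChar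
    have hassoc : pre ++ p :: suf = (pre ++ [p]) ++ suf := by simp
    rw [hassoc, ht]
    have hnpd : p ∉ PySem.List.dedup pre := fun h => hnp ((PySem.List.mem_dedup pre p).1 h)
    rw [List.append_assoc, List.idxOf_append, if_neg hnpd]
    have h0 : List.idxOf p ([p] ++ t) = 0 := by simp
    rw [h0]
    simp only [PySem.Set.len, PySem.List.dedup]
    congr 1
    omega

-- ===== VERDICT (by name: the statement is the Claim_ definition above) =====
theorem string_bigram_substitue_spec : Claim_equal_string_bigram_substitue := by
  intro string _
  unfold Spec_string_bigram_substitue string_bigram_substitue string_bigram_substitue_alt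
  split
  · rfl
  · have hA := A_loop (bgPairs string) [] [] PySem.Dict.empty
      (fun q => by simp [PySem.Dict.contains_empty])
      (fun q hq => absurd hq (List.not_mem_nil))
    norm_num [PySem.List.dedup, PySem.Set.ofList, PySem.Set.empty] at hA
    show some (String.mk (List.foldl bgStep ([], PySem.Dict.empty, 97) (bgPairs string)).1,
        "bigram group")
      = some (String.mk ((bgPairs string).map (fun p =>
          Char.ofNat (97 + PySem.Set.len (PySem.Set.ofList
            (PySem.List.slice (bgPairs string) none
              (some (((PySem.List.index? (bgPairs string) p).getD 0 : Nat) : Int))))).toNat)),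
        "bigram group")
    rw [hA, List.map_congr_left (fun p hp => (B_lookup (bgPairs string) p hp).symm)]
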